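-- pv_equiv track=rewrite | github.com/RaminMammadzada/trackable_agents | scripts/watch-repo-activity.py | workspace_change_summary
-- ===== SOURCE A (Python) =====
-- def workspace_change_summary(previous_files, current_files):
--     previous_keys = set(previous_files.keys())
--     current_keys = set(current_files.keys())
--     added = sorted(current_keys - previous_keys)
--     removed = sorted(previous_keys - current_keys)
--     modified = sorted(
--         path for path in (previous_keys & current_keys)
--         if previous_files[path] != current_files[path]
--     )
--     return added, removed, modified
-- ===== SOURCE B (Python) =====
-- def workspace_change_summary(previous_files, current_files):
--     # Sort both item lists by key once, then a single two-pointer merge scan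
--     # classifies every key; outputs come out already sorted.
--     prev = sorted(previous_files.items(), key=lambda kv: kv[0])
--     cur = sorted(current_files.items(), key=lambda kv: kv[0])
--     added, removed, modified = [], [], []
--     i = j = 0
--     while i < len(prev) and j < len(cur):
--         pk, pv = prev[i]
--         ck, cv = cur[j]
--         if ck < pk:
--             added.append(ck)
--             j += 1
--         elif pk < ck:
--             removed.append(pk)
--             i += 1
--         else:
--             if pv != cv:
--                 modified.append(ck)
--             i += 1
--             j += 1
--     removed.extend(pk for pk, _ in prev[i:])
--     added.extend(ck for ck, _ in cur[j:])
--     return added, removed, modified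
-- ===== Notes on version B (the rewrite author's own statement) =====
-- stated objective: alternative
-- what changed: Replaces A's set-difference/intersection algebra plus three final sorts by sorting both item lists by key once and classifying every key in a single two-pointer merge scan, which emits the three lists already in order.
import Mathlib
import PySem

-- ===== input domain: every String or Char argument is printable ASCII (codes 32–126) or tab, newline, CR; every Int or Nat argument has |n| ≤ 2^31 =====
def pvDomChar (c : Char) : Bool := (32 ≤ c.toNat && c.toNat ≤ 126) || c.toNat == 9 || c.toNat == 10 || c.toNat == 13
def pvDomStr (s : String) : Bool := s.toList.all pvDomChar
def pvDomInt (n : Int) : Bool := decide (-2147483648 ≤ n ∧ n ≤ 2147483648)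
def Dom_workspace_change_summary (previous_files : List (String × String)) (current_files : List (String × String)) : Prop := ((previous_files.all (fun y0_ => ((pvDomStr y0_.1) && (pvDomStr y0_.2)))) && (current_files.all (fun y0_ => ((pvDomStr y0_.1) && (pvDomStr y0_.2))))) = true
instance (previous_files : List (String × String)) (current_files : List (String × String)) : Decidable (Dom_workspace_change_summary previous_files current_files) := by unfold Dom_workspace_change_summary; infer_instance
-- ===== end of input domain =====

-- B replaces A's set-difference/intersection algebra by sort-both-then-two-pointer-merge:
-- both item lists are sorted by key once and a single merge scan classifies every key,
-- producing the three lists already in sorted order; objective: alternative (same cost).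


-- ===== PORT A =====
def workspace_change_summary (previous_files : List (String × String)) (current_files : List (String × String)) : List String × List String × List String :=
  let prevD := PySem.Dict.mk previous_files
  let curD := PySem.Dict.mk current_files
  let previous_keys := PySem.Set.ofList prevD.keys
  let current_keys := PySem.Set.ofList curD.keys
  let added := PySem.List.sorted (PySem.Set.diff current_keys previous_keys) (fun x => x) false
  let removed := PySem.List.sorted (PySem.Set.diff previous_keys current_keys) (fun x => x) false
  -- previous_files[path] / current_files[path]: both keys are in the intersection, so the
  -- lookups are some; '!=' is ported as inequality of the two (present) lookups
  let modified := PySem.List.sorted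
      ((PySem.Set.inter previous_keys current_keys).filter
        (fun p => !(prevD.get? p == curD.get? p))) (fun x => x) false
  (added, removed, modified)

-- ===== PORT B =====
-- the two-pointer merge loop of Source B: both arguments are key-sorted item lists
def pvMerge : List (String × String) → List (String × String) → List String × List String × List String
  | [], cs => (cs.map Prod.fst, [], [])
  | p :: ps, [] => ([], (p :: ps).map Prod.fst, [])
  | (pk, pv) :: ps, (ck, cv) :: cs =>
    if ck < pk then
      let r := pvMerge ((pk, pv) :: ps) cs
      (ck :: r.1, r.2.1, r.2.2)
    else if pk < ck then
      let r := pvMerge ps ((ck, cv) :: cs)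
      (r.1, pk :: r.2.1, r.2.2)
    else
      let r := pvMerge ps cs
      (r.1, r.2.1, if pv != cv then ck :: r.2.2 else r.2.2)
termination_by ps cs => ps.length + cs.length

def workspace_change_summary_alt (previous_files : List (String × String)) (current_files : List (String × String)) : List String × List String × List String :=
  let prev := PySem.List.sorted previous_files (fun kv => kv.1) false
  let cur := PySem.List.sorted current_files (fun kv => kv.1) false
  pvMerge prev cur

-- ===== PRECONDITION & SPEC =====
-- Both parameters are Python dicts, whose association lists always have distinct keys;
-- Pre_ excludes only raw lists with duplicate keys, which no Python call can produce.
def Pre_workspace_change_summary (previous_files : List (String × String)) (current_files : List (String × String)) : Prop :=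
  (previous_files.map Prod.fst).Nodup ∧ (current_files.map Prod.fst).Nodup
instance (previous_files : List (String × String)) (current_files : List (String × String)) : Decidable (Pre_workspace_change_summary previous_files current_files) := by unfold Pre_workspace_change_summary; infer_instance

def pvWitness_workspace_change_summary : (List (String × String)) × (List (String × String)) :=
  ([("a", "1"), ("b", "2")], [("a", "9"), ("c", "3")])

def Spec_workspace_change_summary (previous_files : List (String × String)) (current_files : List (String × String)) (out : List String × List String × List String) : Prop := out = workspace_change_summary_alt previous_files current_files
instance (previous_files : List (String × String)) (current_files : List (String × String)) (out : List String × List String × List String) : Decidable (Spec_workspace_change_summary previous_files current_files out) := by unfold Spec_workspace_change_summary; infer_instance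

-- ===== CLAIM (what is proved, stated in full; the proofs are below) =====
def Claim_equal_workspace_change_summary : Prop := ∀ (previous_files : List (String × String)) (current_files : List (String × String)), Dom_workspace_change_summary previous_files current_files → Pre_workspace_change_summary previous_files current_files → Spec_workspace_change_summary previous_files current_files (workspace_change_summary previous_files current_files)

-- ===== LEMMAS AND PROOFS =====

theorem lookup_eq_none_iff (l : List (String × String)) (x : String) :
    List.lookup x l = none ↔ x ∉ l.map Prod.fst := by
  induction l with
  | nil => simp
  | cons kv t ih =>
    obtain ⟨k, w⟩ := kv
    by_cases h : x = k
    · subst h; simp [List.lookup]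
    · have hb : (x == k) = false := beq_eq_false_iff_ne.mpr h
      simp only [List.lookup, hb, ih, List.map_cons, List.mem_cons]
      simp [h]

theorem lookup_eq_some_iff (l : List (String × String)) (hl : (l.map Prod.fst).Nodup)
    (x : String) (v : String) : List.lookup x l = some v ↔ (x, v) ∈ l := by
  induction l with
  | nil => simp
  | cons kv t ih =>
    obtain ⟨k, w⟩ := kv
    simp only [List.map_cons, List.nodup_cons] at hl
    by_cases h : x = k
    · subst h
      simp only [List.lookup, beq_self_eq_true, List.mem_cons]
      constructor
      · rintro hh; injection hh with hh; subst hh; exact Or.inl rfl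
      · rintro (hh | hh)
        · injection hh with h1 h2; subst h2; rfl
        · exact absurd (List.mem_map.mpr ⟨_, hh, rfl⟩) hl.1
    · have hb : (x == k) = false := beq_eq_false_iff_ne.mpr h
      simp [List.lookup, hb, ih hl.2, Prod.ext_iff, h]

theorem dict_get?_eq_lookup (l : List (String × String)) (x : String) :
    (PySem.Dict.mk l).get? x = List.lookup x l := by
  induction l with
  | nil => rfl
  | cons kv t ih =>
    rw [PySem.Dict.get?_mk_cons]
    by_cases h : kv.1 = x
    · have hb : (x == kv.1) = true := beq_iff_eq.mpr h.symm
      have hb2 : (kv.1 == x) = true := beq_iff_eq.mpr h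
      simp [List.lookup, hb, hb2]
    · have hb : (x == kv.1) = false := beq_eq_false_iff_ne.mpr (fun hh => h hh.symm)
      have hb2 : (kv.1 == x) = false := beq_eq_false_iff_ne.mpr h
      simp [List.lookup, hb, hb2, ih]

theorem merge_eq (ps cs : List (String × String))
    (hp : (ps.map Prod.fst).Pairwise (· < ·)) (hc : (cs.map Prod.fst).Pairwise (· < ·)) :
    pvMerge ps cs =
      ((cs.map Prod.fst).filter (fun k => !(ps.map Prod.fst).contains k),
       (ps.map Prod.fst).filter (fun k => !(cs.map Prod.fst).contains k),
       (cs.filter (fun kv => (List.lookup kv.1 ps).elim false (fun v => v != kv.2))).map Prod.fst) := by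
  induction ps, cs using pvMerge.induct with
  | case1 cs =>
    simp [pvMerge]
  | case2 p ps =>
    simp [pvMerge]
  | case3 pk pv ps ck cv cs hlt ih =>
    have hpm := hp; rw [List.map_cons] at hpm
    have hcm := hc; rw [List.map_cons] at hcm
    have hp1 := List.pairwise_cons.mp hpm
    have hc1 := List.pairwise_cons.mp hcm
    have hkeys : ∀ k ∈ List.map Prod.fst ((pk, pv) :: ps), ck < k := by
      rw [List.map_cons]
      rintro k hk
      rcases List.mem_cons.mp hk with rfl | hk
      · exact hlt
      · exact lt_trans hlt (hp1.1 k hk)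
    have hcont : (List.map Prod.fst ((pk, pv) :: ps)).contains ck = false := by
      simp only [List.contains_eq_mem, decide_eq_false_iff_not]
      intro hm; exact lt_irrefl ck (hkeys ck hm)
    have hlook : List.lookup ck ((pk, pv) :: ps) = none :=
      (lookup_eq_none_iff _ _).mpr (fun hm => lt_irrefl ck (hkeys ck hm))
    have hrm : List.filter (fun k => !(List.map Prod.fst ((ck, cv) :: cs)).contains k)
        (List.map Prod.fst ((pk, pv) :: ps))
        = List.filter (fun k => !(List.map Prod.fst cs).contains k)
          (List.map Prod.fst ((pk, pv) :: ps)) := by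
      apply List.filter_congr
      intro k hk
      have hne : (k == ck) = false := beq_eq_false_iff_ne.mpr (ne_of_gt (hkeys k hk))
      simp [hne]
    simp only [List.map_cons] at *
    simp only [pvMerge, if_pos hlt, ih hp hc1.2]
    refine Prod.ext ?_ (Prod.ext ?_ ?_)
    · simp only [List.filter_cons, hcont, Bool.not_false, if_true]
    · exact hrm.symm
    · simp only [List.filter_cons, hlook, Option.elim]
      simp
  | case4 pk pv ps ck cv cs hnlt hlt ih =>
    have hpm := hp; rw [List.map_cons] at hpm
    have hcm := hc; rw [List.map_cons] at hcm
    have hp1 := List.pairwise_cons.mp hpm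
    have hc1 := List.pairwise_cons.mp hcm
    have hkeys : ∀ k ∈ List.map Prod.fst ((ck, cv) :: cs), pk < k := by
      rw [List.map_cons]
      rintro k hk
      rcases List.mem_cons.mp hk with rfl | hk
      · exact hlt
      · exact lt_trans hlt (hc1.1 k hk)
    have hcont : (List.map Prod.fst ((ck, cv) :: cs)).contains pk = false := by
      simp only [List.contains_eq_mem, decide_eq_false_iff_not]
      intro hm; exact lt_irrefl pk (hkeys pk hm)
    have hadd : List.filter (fun k => !(List.map Prod.fst ((pk, pv) :: ps)).contains k)
        (List.map Prod.fst ((ck, cv) :: cs))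
        = List.filter (fun k => !(List.map Prod.fst ps).contains k)
          (List.map Prod.fst ((ck, cv) :: cs)) := by
      apply List.filter_congr
      intro k hk
      have hne : (k == pk) = false := beq_eq_false_iff_ne.mpr (ne_of_gt (hkeys k hk))
      simp [hne]
    have hmod : List.filter (fun kv => (List.lookup kv.1 ((pk, pv) :: ps)).elim false fun v => v != kv.2)
        ((ck, cv) :: cs)
        = List.filter (fun kv => (List.lookup kv.1 ps).elim false fun v => v != kv.2)
          ((ck, cv) :: cs) := by
      apply List.filter_congr
      intro kv hkv
      have hk1 : pk < kv.1 := hkeys kv.1 (List.mem_map.mpr ⟨kv, hkv, rfl⟩)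
      have hne : (kv.1 == pk) = false := beq_eq_false_iff_ne.mpr (ne_of_gt hk1)
      simp [List.lookup, hne]
    simp only [List.map_cons] at *
    simp only [pvMerge, if_neg hnlt, if_pos hlt, ih hp1.2 hc]
    refine Prod.ext ?_ (Prod.ext ?_ ?_)
    · exact hadd.symm
    · simp only [List.filter_cons, hcont, Bool.not_false, if_true]
    · rw [hmod]
  | case5 pk pv ps ck cv cs hnlt1 hnlt2 ih =>
    have heq : pk = ck := le_antisymm (not_lt.mp hnlt1) (not_lt.mp hnlt2)
    subst heq
    have hpm := hp; rw [List.map_cons] at hpm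
    have hcm := hc; rw [List.map_cons] at hcm
    have hp1 := List.pairwise_cons.mp hpm
    have hc1 := List.pairwise_cons.mp hcm
    have hcontp : (List.map Prod.fst ((pk, pv) :: ps)).contains pk = true := by
      simp
    have hcontc : (List.map Prod.fst ((pk, cv) :: cs)).contains pk = true := by
      simp
    have hadd : List.filter (fun k => !(List.map Prod.fst ((pk, pv) :: ps)).contains k)
        (List.map Prod.fst cs)
        = List.filter (fun k => !(List.map Prod.fst ps).contains k)
          (List.map Prod.fst cs) := by
      apply List.filter_congr
      intro k hk
      have hne : (k == pk) = false := beq_eq_false_iff_ne.mpr (ne_of_gt (hc1.1 k hk))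
      simp [hne]
    have hrm : List.filter (fun k => !(List.map Prod.fst ((pk, cv) :: cs)).contains k)
        (List.map Prod.fst ps)
        = List.filter (fun k => !(List.map Prod.fst cs).contains k)
          (List.map Prod.fst ps) := by
      apply List.filter_congr
      intro k hk
      have hne : (k == pk) = false := beq_eq_false_iff_ne.mpr (ne_of_gt (hp1.1 k hk))
      simp [hne]
    have hmod : List.filter (fun kv => (List.lookup kv.1 ((pk, pv) :: ps)).elim false fun v => v != kv.2) cs
        = List.filter (fun kv => (List.lookup kv.1 ps).elim false fun v => v != kv.2) cs := by
      apply List.filter_congr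
      intro kv hkv
      have hk1 : pk < kv.1 := hc1.1 kv.1 (List.mem_map.mpr ⟨kv, hkv, rfl⟩)
      have hne : (kv.1 == pk) = false := beq_eq_false_iff_ne.mpr (ne_of_gt hk1)
      simp [List.lookup, hne]
    simp only [List.map_cons] at *
    simp only [pvMerge, if_neg hnlt1, ih hp1.2 hc1.2]
    refine Prod.ext ?_ (Prod.ext ?_ ?_)
    · simp only [List.filter_cons, hcontp, Bool.not_true, Bool.false_eq_true, if_false]
      exact hadd.symm
    · simp only [List.filter_cons, hcontc, Bool.not_true, Bool.false_eq_true, if_false]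
      exact hrm.symm
    · have hlookhd : List.lookup pk ((pk, pv) :: ps) = some pv := by
        simp [List.lookup]
      simp only [List.filter_cons, hlookhd, Option.elim_some, hmod]
      by_cases hv : (pv != cv) = true
      · simp [hv]
      · simp only [Bool.not_eq_true] at hv
        simp [hv]

theorem lookup_perm (l l' : List (String × String)) (h : l.Perm l')
    (hl : (l.map Prod.fst).Nodup) (x : String) :
    List.lookup x l = List.lookup x l' := by
  have hl' : (l'.map Prod.fst).Nodup := (h.map Prod.fst).nodup_iff.mp hl
  cases hlk : List.lookup x l' with
  | none =>
    rw [lookup_eq_none_iff] at hlk ⊢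
    intro hm; exact hlk ((h.map Prod.fst).mem_iff.mp hm)
  | some v =>
    rw [lookup_eq_some_iff l' hl'] at hlk
    exact (lookup_eq_some_iff l hl x v).mpr (h.mem_iff.mpr hlk)

theorem pairwise_lt_keys_sorted (l : List (String × String)) (hl : (l.map Prod.fst).Nodup) :
    ((PySem.List.sorted l (fun kv => kv.1) false).map Prod.fst).Pairwise (· < ·) := by
  have hperm : (PySem.List.sorted l (fun kv => kv.1) false).Perm l := PySem.List.sorted_perm l _ false
  have hnd : ((PySem.List.sorted l (fun kv => kv.1) false).map Prod.fst).Nodup :=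
    ((hperm.map Prod.fst).nodup_iff).mpr hl
  have hle : ((PySem.List.sorted l (fun kv => kv.1) false).map Prod.fst).Pairwise (· ≤ ·) := by
    rw [List.pairwise_map]
    exact PySem.List.sorted_pairwise l _
  exact (hle.and hnd).imp (fun {a b} hab => lt_of_le_of_ne hab.1 hab.2)

theorem workspace_change_summary_spec' (previous_files : List (String × String)) (current_files : List (String × String))
    (hpn : (previous_files.map Prod.fst).Nodup) (hcn : (current_files.map Prod.fst).Nodup) :
    workspace_change_summary previous_files current_files = workspace_change_summary_alt previous_files current_files := by
  unfold workspace_change_summary workspace_change_summary_alt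
  have hsp : (PySem.List.sorted previous_files (fun kv => kv.1) false).Perm previous_files :=
    PySem.List.sorted_perm previous_files _ false
  have hsc : (PySem.List.sorted current_files (fun kv => kv.1) false).Perm current_files :=
    PySem.List.sorted_perm current_files _ false
  have hspk : ((PySem.List.sorted previous_files (fun kv => kv.1) false).map Prod.fst).Perm (previous_files.map Prod.fst) := hsp.map Prod.fst
  have hsck : ((PySem.List.sorted current_files (fun kv => kv.1) false).map Prod.fst).Perm (current_files.map Prod.fst) := hsc.map Prod.fst
  have hplt := pairwise_lt_keys_sorted previous_files hpn
  have hclt := pairwise_lt_keys_sorted current_files hcn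
  rw [merge_eq _ _ hplt hclt]
  simp only [PySem.Dict.keys]
  rw [PySem.Set.ofList_eq_self_of_nodup _ hpn, PySem.Set.ofList_eq_self_of_nodup _ hcn]
  have hspn : ((PySem.List.sorted previous_files (fun kv => kv.1) false).map Prod.fst).Nodup := hspk.nodup_iff.mpr hpn
  have hscn : ((PySem.List.sorted current_files (fun kv => kv.1) false).map Prod.fst).Nodup := hsck.nodup_iff.mpr hcn
  refine Prod.ext ?_ (Prod.ext ?_ ?_)
  · -- added
    simp only [PySem.Set.diff, PySem.Set.contains]
    apply PySem.List.sorted_eq_of_perm_of_pairwise_lt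
    · refine List.Perm.trans ?_ (hsck.filter _)
      apply List.Perm.of_eq
      apply List.filter_congr
      intro k _
      have : ((PySem.List.sorted previous_files (fun kv => kv.1) false).map Prod.fst).contains k
          = (previous_files.map Prod.fst).contains k := by
        simp [List.contains_eq_mem, hspk.mem_iff]
      rw [this]
    · exact List.Pairwise.sublist List.filter_sublist hclt
  · -- removed
    simp only [PySem.Set.diff, PySem.Set.contains]
    apply PySem.List.sorted_eq_of_perm_of_pairwise_lt
    · refine List.Perm.trans ?_ (hspk.filter _)
      apply List.Perm.of_eq
      apply List.filter_congr
      intro k _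
      have : ((PySem.List.sorted current_files (fun kv => kv.1) false).map Prod.fst).contains k
          = (current_files.map Prod.fst).contains k := by
        simp [List.contains_eq_mem, hsck.mem_iff]
      rw [this]
    · exact List.Pairwise.sublist List.filter_sublist hplt
  · -- modified
    simp only [PySem.Set.inter, PySem.Set.contains]
    apply PySem.List.sorted_eq_of_perm_of_pairwise_lt
    · -- permutation via same-membership on nodup lists
      rw [List.perm_ext_iff_of_nodup
        ((hscn.sublist (List.filter_sublist.map Prod.fst))) ((hpn.filter _).filter _)]
      intro k
      constructor
      · rintro hk
        obtain ⟨kv, hkvf, rfl⟩ := List.mem_map.mp hk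
        obtain ⟨hkvm, hpred⟩ := List.mem_filter.mp hkvf
        have hkvc : kv ∈ current_files := hsc.mem_iff.mp hkvm
        have hlkc : List.lookup kv.1 current_files = some kv.2 :=
          (lookup_eq_some_iff current_files hcn kv.1 kv.2).mpr hkvc
        rw [lookup_perm _ previous_files (hsp) hspn] at hpred
        cases hlkp : List.lookup kv.1 previous_files with
        | none => rw [hlkp] at hpred; simp at hpred
        | some v =>
          rw [hlkp] at hpred
          simp only [Option.elim_some, bne_iff_ne, ne_eq] at hpred
          have hkp : kv.1 ∈ previous_files.map Prod.fst := by
            by_contra hmem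
            rw [(lookup_eq_none_iff previous_files kv.1).mpr hmem] at hlkp
            cases hlkp
          refine List.mem_filter.mpr ⟨List.mem_filter.mpr ⟨hkp, ?_⟩, ?_⟩
          · simp [List.contains_eq_mem, List.mem_map.mpr ⟨kv, hkvc, rfl⟩]
          · rw [dict_get?_eq_lookup, dict_get?_eq_lookup, hlkp, hlkc]
            simp [hpred]
      · rintro hk
        obtain ⟨hk1, hne⟩ := List.mem_filter.mp hk
        obtain ⟨hkp, hkc⟩ := List.mem_filter.mp hk1
        rw [dict_get?_eq_lookup, dict_get?_eq_lookup] at hne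
        have hkc' : k ∈ current_files.map Prod.fst := by
          simpa [List.contains_eq_mem] using hkc
        obtain ⟨kv, hkvc, hkveq⟩ := List.mem_map.mp hkc'
        obtain ⟨kvp, hkvp, hkvpeq⟩ := List.mem_map.mp hkp
        have hlkc : List.lookup k current_files = some kv.2 := by
          rw [← hkveq] at *
          exact (lookup_eq_some_iff current_files hcn kv.1 kv.2).mpr hkvc
        have hlkp : List.lookup k previous_files = some kvp.2 := by
          rw [← hkvpeq] at *
          exact (lookup_eq_some_iff previous_files hpn kvp.1 kvp.2).mpr hkvp
        refine List.mem_map.mpr ⟨kv, List.mem_filter.mpr ⟨hsc.mem_iff.mpr hkvc, ?_⟩, hkveq⟩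
        rw [lookup_perm _ previous_files hsp hspn]
        have hkk : kv.1 = k := hkveq
        rw [hkk, hlkp]
        simp only [Option.elim_some, bne_iff_ne, ne_eq]
        intro hvv
        rw [hlkp, hlkc] at hne
        rw [hvv] at hne
        simp at hne
    · exact List.Pairwise.sublist (List.filter_sublist.map Prod.fst) hclt

-- ===== VERDICT (by name: the statement is the Claim_ definition above) =====
theorem workspace_change_summary_spec : Claim_equal_workspace_change_summary := by
  intro p c _ hpre
  exact workspace_change_summary_spec' p c hpre.1 hpre.2
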